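-- pv_equiv track=rewrite | github.com/manas-17045/LeetcodeSolutions | Leetcode 2501-2600/2530/2530.py | maxKelements
-- ===== SOURCE A (Python) =====
-- import heapq
--
-- def maxKelements(nums: list[int], k: int) -> int:
--     """
--     Calculates the maximal score after applying k operations.
--
--     Args:
--         nums: A list of integers representing the initial numbers.
--         k: An integer representing the number of operations to apply.
--     Returns:
--         An integer representing the maximal score.
--     """
--     maxHeap = [-x for x in nums]
--     heapq.heapify(maxHeap)
--     totalScore = 0
--
--     for _ in range(k):
--         currentVal = -heapq.heappop(maxHeap)
--         totalScore += currentVal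
--         nextVal = (currentVal + 2) // 3
--         heapq.heappush(maxHeap, -nextVal)
--
--     return totalScore
-- ===== SOURCE B (Python) =====
-- def maxKelements(nums: list[int], k: int) -> int:
--     """Greedy max-score, but with a plain ascending sorted list instead of a
--     negated min-heap: sort once, pop the largest from the end, re-insert the
--     decayed value at the position found by a hand-written binary search."""
--     state = sorted(nums)
--     total = 0
--     for _ in range(k):
--         m = state.pop()
--         total += m
--         v = (m + 2) // 3
--         lo, hi = 0, len(state)
--         while lo < hi:
--             mid = (lo + hi) // 2
--             if state[mid] <= v:
--                 lo = mid + 1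
--             else:
--                 hi = mid
--         state.insert(lo, v)
--     return total
-- ===== Notes on version B (the rewrite author's own statement) =====
-- stated objective: alternative
-- what changed: Replaces the negated min-heap (heapify + heappop/heappush) by a single ascending sort followed by pop-from-the-end and re-insertion of the decayed value at the position found by a hand-written binary search.
import Mathlib
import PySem

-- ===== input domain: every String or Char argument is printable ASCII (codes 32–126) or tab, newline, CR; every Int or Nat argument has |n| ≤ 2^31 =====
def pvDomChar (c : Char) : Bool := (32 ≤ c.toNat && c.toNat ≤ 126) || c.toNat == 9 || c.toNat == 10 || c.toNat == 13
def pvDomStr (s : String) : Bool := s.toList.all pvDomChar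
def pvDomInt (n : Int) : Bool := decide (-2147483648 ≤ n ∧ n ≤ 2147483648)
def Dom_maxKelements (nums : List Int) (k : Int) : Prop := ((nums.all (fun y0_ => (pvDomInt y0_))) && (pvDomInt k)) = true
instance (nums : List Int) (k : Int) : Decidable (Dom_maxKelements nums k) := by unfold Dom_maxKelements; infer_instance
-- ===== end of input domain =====

-- B replaces A's negated min-heap by one ascending sort plus pop-from-the-end and ordered
-- re-insertion of the decayed value (alternative data structure, same greedy result).
-- (A mutates no caller-visible argument; heapq calls in A are ported at value level: heappop = remove a minimum element.)


-- ===== PORT A =====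
-- heap loop: each of the k iterations pops the minimum of the negated heap,
-- adds its negation to the score, and pushes the negated decayed value.
def aLoop : Nat → List Int → Int → Int
  | 0, _, total => total
  | n + 1, heap, total =>
    match PySem.List.min? heap (fun y => y) with
    | none => total   -- heappop raises IndexError here; excluded by Pre_
    | some m =>
      let currentVal := -m
      let nextVal := PySem.Int.floordiv (currentVal + 2) 3
      aLoop n (((PySem.List.remove? heap m).getD []) ++ [-nextVal]) (total + currentVal)

def maxKelements (nums : List Int) (k : Int) : Int :=
  aLoop k.toNat (nums.map (fun x => -x)) 0

-- ===== PORT B =====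
-- hand-written binary search of Source B (bisect_right): while lo < hi, probe the middle.
-- state[mid] is ported as getD mid 0: the loop only probes mid < hi <= len(state), where getD is exact.
def bSearch (state : List Int) (v : Int) : Nat → Nat → Nat → Nat
  | 0, lo, _ => lo   -- fuel guard only: with fuel = hi - lo the 0 case is never the loop's exit
  | fuel + 1, lo, hi =>
    if lo < hi then
      let mid := (lo + hi) / 2
      if state.getD mid 0 <= v then bSearch state v fuel (mid + 1) hi
      else bSearch state v fuel lo mid
    else lo

def bLoop : Nat -> List Int -> Int -> Int
  | 0, _, total => total
  | n + 1, state, total =>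
    match state.getLast? with
    | none => total   -- state.pop() raises IndexError here; excluded by Pre_
    | some m =>
      let v := PySem.Int.floordiv (m + 2) 3
      let s' := state.dropLast
      bLoop n (PySem.List.insert s' ((bSearch s' v s'.length 0 s'.length : Nat) : Int) v) (total + m)

def maxKelements_alt (nums : List Int) (k : Int) : Int :=
  bLoop k.toNat (PySem.List.sorted nums (fun x => x)) 0

-- ===== PRECONDITION & SPEC =====
-- Pre_ excludes exactly the inputs where A raises IndexError (heappop of an empty heap):
-- empty nums with at least one operation requested.
def Pre_maxKelements (nums : List Int) (k : Int) : Prop := nums ≠ [] ∨ k ≤ 0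
instance (nums : List Int) (k : Int) : Decidable (Pre_maxKelements nums k) := by
  unfold Pre_maxKelements; infer_instance
def pvWitness_maxKelements : List Int × Int := ([5, 3, -2], 4)

def Spec_maxKelements (nums : List Int) (k : Int) (out : Int) : Prop := out = maxKelements_alt nums k
instance (nums : List Int) (k : Int) (out : Int) : Decidable (Spec_maxKelements nums k out) := by
  unfold Spec_maxKelements; infer_instance

-- ===== CLAIM (what is proved, stated in full; the proofs are below) =====
def Claim_equal_maxKelements : Prop := ∀ (nums : List Int) (k : Int), Dom_maxKelements nums k → Pre_maxKelements nums k → Spec_maxKelements nums k (maxKelements nums k)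

-- ===== LEMMAS AND PROOFS =====

lemma bSearch_spec (state : List Int) (v : Int) :
    ∀ (fuel lo hi : Nat), hi - lo ≤ fuel → state.Pairwise (· ≤ ·) → lo ≤ hi → hi ≤ state.length →
    (∀ i (h : i < state.length), i < lo → state[i] ≤ v) →
    (∀ i (h : i < state.length), hi ≤ i → v < state[i]) →
    bSearch state v fuel lo hi ≤ state.length ∧
    (∀ i (h : i < state.length), i < bSearch state v fuel lo hi → state[i] ≤ v) ∧
    (∀ i (h : i < state.length), bSearch state v fuel lo hi ≤ i → v < state[i]) := by
  intro fuel
  induction fuel with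
  | zero =>
    intro lo hi hf hs hlohi hhi hpre hpost
    have : lo = hi := by omega
    subst this
    rw [bSearch]
    exact ⟨by omega, fun i h hi => hpre i h hi, fun i h hi => hpost i h hi⟩
  | succ fuel ih =>
    intro lo hi hf hs hlohi hhi hpre hpost
    by_cases hlt : lo < hi
    · rw [bSearch, if_pos hlt]
      set mid := (lo + hi) / 2 with hmid
      have hmlt : mid < state.length := by omega
      have hgd : state.getD mid 0 = state[mid] := List.getD_eq_getElem state 0 hmlt
      by_cases hc : state.getD mid 0 ≤ v
      · rw [if_pos hc]
        rw [hgd] at hc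
        refine ih (mid + 1) hi (by omega) hs (by omega) hhi ?_ hpost
        intro i hi' hilt
        calc state[i] ≤ state[mid] := by
              rcases Nat.lt_or_ge i mid with h | h
              · exact List.pairwise_iff_getElem.mp hs i mid hi' hmlt h
              · have : i = mid := by omega
                simp [this]
          _ ≤ v := hc
      · rw [if_neg hc]
        rw [hgd] at hc
        refine ih lo mid (by omega) hs (by omega) (by omega) hpre ?_
        intro i hi' hmi
        calc v < state[mid] := by omega
          _ ≤ state[i] := by
              rcases Nat.lt_or_ge mid i with h | h
              · exact List.pairwise_iff_getElem.mp hs mid i hmlt hi' h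
              · have : i = mid := by omega
                simp [this]
    · rw [bSearch, if_neg hlt]
      have : lo = hi := by omega
      subst this
      exact ⟨by omega, fun i h hi => hpre i h hi, fun i h hi => hpost i h (by omega)⟩

lemma bSearch_le (state : List Int) (v : Int) :
    ∀ (fuel lo hi : Nat), lo ≤ hi → bSearch state v fuel lo hi ≤ hi := by
  intro fuel
  induction fuel with
  | zero => intro lo hi h; rw [bSearch]; omega
  | succ fuel ih =>
    intro lo hi h
    by_cases hlt : lo < hi
    · rw [bSearch, if_pos hlt]
      by_cases hc : state.getD ((lo + hi) / 2) 0 ≤ v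
      · rw [if_pos hc]; exact ih _ _ (by omega)
      · rw [if_neg hc]; exact le_trans (ih _ _ (by omega)) (by omega)
    · rw [bSearch, if_neg hlt]; omega

-- the inserted list, in its take/drop form
lemma insert_at_bSearch (s : List Int) (v : Int) :
    PySem.List.insert s ((bSearch s v s.length 0 s.length : Nat) : Int) v
      = s.take (bSearch s v s.length 0 s.length) ++ v :: s.drop (bSearch s v s.length 0 s.length) :=
  PySem.List.insert_natCast s _ v (bSearch_le s v s.length 0 s.length (Nat.zero_le _))

lemma pairwise_insert_at (s : List Int) (v : Int) (hs : s.Pairwise (· ≤ ·)) :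
    (s.take (bSearch s v s.length 0 s.length) ++ v :: s.drop (bSearch s v s.length 0 s.length)).Pairwise (· ≤ ·) := by
  obtain ⟨hle, hpre, hpost⟩ :=
    bSearch_spec s v s.length 0 s.length (by omega) hs (Nat.zero_le _) (le_refl _)
      (by omega) (by intro i h hi; omega)
  set p := bSearch s v s.length 0 s.length with hp
  have htk : ∀ a ∈ s.take p, a ≤ v := by
    intro a ha
    obtain ⟨i, hi, hia⟩ := List.mem_iff_getElem.mp ha
    have hil : i < s.length := by
      have := List.length_take_le p s; omega
    have hip : i < p := by simp at hi; omega
    have : (s.take p)[i] = s[i] := List.getElem_take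
    rw [this] at hia
    exact hia ▸ hpre i hil hip
  have hdr : ∀ b ∈ s.drop p, v ≤ b := by
    intro b hb
    obtain ⟨j, hj, hjb⟩ := List.mem_iff_getElem.mp hb
    have hjl : p + j < s.length := by simp at hj; omega
    have : (s.drop p)[j] = s[p + j] := List.getElem_drop
    rw [this] at hjb
    exact hjb ▸ le_of_lt (hpost (p + j) hjl (by omega))
  refine List.pairwise_append.mpr ⟨hs.sublist (List.take_sublist _ _), ?_, ?_⟩
  · refine List.pairwise_cons.mpr ⟨hdr, hs.sublist (List.drop_sublist _ _)⟩
  · intro a ha b hb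
    rcases List.mem_cons.mp hb with rfl | hb
    · exact htk a ha
    · exact le_trans (htk a ha) (hdr b hb)

lemma coe_insert_at (s : List Int) (v : Int) :
    ((s.take (bSearch s v s.length 0 s.length) ++ v :: s.drop (bSearch s v s.length 0 s.length) : List Int) : Multiset Int)
      = v ::ₘ (s : Multiset Int) := by
  refine Multiset.coe_eq_coe.mpr ?_
  have := List.perm_middle (a := v) (l₁ := s.take (bSearch s v s.length 0 s.length))
    (l₂ := s.drop (bSearch s v s.length 0 s.length))
  simpa [List.take_append_drop] using this

lemma mem_le_getLast {s : List Int} (h : s.Pairwise (· ≤ ·)) (hne : s ≠ []) :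
    ∀ y ∈ s, y ≤ s.getLast hne := by
  induction s with
  | nil => cases hne rfl
  | cons x xs ih =>
    rcases List.pairwise_cons.mp h with ⟨hx, hxs⟩
    intro y hy
    cases xs with
    | nil =>
      simp only [List.mem_singleton] at hy
      simp [hy, List.getLast]
    | cons a t =>
      rw [List.getLast_cons (by simp : (a :: t) ≠ [])]
      rcases List.mem_cons.mp hy with rfl | hy
      · exact le_trans (hx _ (List.getLast_mem _)) (le_refl _)
      · exact ih hxs (by simp) y hy

lemma loop_eq (n : Nat) : ∀ (heap s : List Int) (total : Int),
    s ≠ [] → s.Pairwise (· ≤ ·) →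
    (heap : Multiset Int) = Multiset.map (fun x => -x) (s : Multiset Int) →
    aLoop n heap total = bLoop n s total := by
  induction n with
  | zero => intro heap s total _ _ _; rfl
  | succ n ih =>
    intro heap s total hne hsort hperm
    have hl : s.getLast? = some (s.getLast hne) := List.getLast?_eq_some_getLast hne
    set l := s.getLast hne with hldef
    -- the heap is nonempty
    have hheapne : heap ≠ [] := by
      intro h0
      apply hne
      have : (heap : Multiset Int) = 0 := by simp [h0]
      rw [hperm] at this
      simpa [Multiset.map_eq_zero, Multiset.coe_eq_zero] using this
    obtain ⟨m, hm⟩ : ∃ m, PySem.List.min? heap (fun y => y) = some m := by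
      cases hmin : PySem.List.min? heap (fun y => y) with
      | none => exact absurd ((PySem.List.min?_eq_none_iff _ _).mp hmin) hheapne
      | some m => exact ⟨m, rfl⟩
    -- the minimum of the negated multiset is the negation of the max l
    have hmem : m ∈ heap := PySem.List.min?_mem hm
    have hmem' : (m : Int) ∈ (Multiset.map (fun x => -x) (s : Multiset Int)) := by
      rw [← hperm]; exact_mod_cast hmem
    obtain ⟨y, hy, hym⟩ := Multiset.mem_map.mp hmem'
    have hys : y ∈ s := hy
    have hnl_mem : (-l) ∈ heap := by
      have : (-l : Int) ∈ Multiset.map (fun x => -x) (s : Multiset Int) :=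
        Multiset.mem_map.mpr ⟨l, by exact_mod_cast List.getLast_mem hne, rfl⟩
      rw [← hperm] at this
      exact_mod_cast this
    have hmle : m ≤ -l := PySem.List.min?_isMin hm (-l) hnl_mem
    have hlem : -l ≤ m := by
      have := mem_le_getLast hsort hne y hys
      omega
    have hmeq : m = -l := le_antisymm hmle hlem
    -- unfold one step of both loops
    rw [aLoop, bLoop, hm, hl]
    dsimp only
    have hrem : PySem.List.remove? heap m = some (heap.erase m) :=
      PySem.List.remove?_eq_some_erase heap m hmem
    rw [hrem]
    simp only [Option.getD_some]
    -- the decayed values agree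
    have hval : PySem.Int.floordiv (-m + 2) 3 = PySem.Int.floordiv (l + 2) 3 := by
      rw [hmeq]; norm_num
    set v := PySem.Int.floordiv (l + 2) 3 with hv
    have htot : total + -m = total + l := by rw [hmeq]; ring
    rw [hval, htot]
    have hsortd : (s.dropLast).Pairwise (· ≤ ·) := hsort.sublist (List.dropLast_sublist s)
    rw [insert_at_bSearch s.dropLast v]
    -- apply the induction hypothesis to the new states
    apply ih
    · simp
    · exact pairwise_insert_at s.dropLast v hsortd
    · -- multiset equality of the new states
      have hsplit : (s : Multiset Int) = (s.dropLast : Multiset Int) + {l} := by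
        conv_lhs => rw [← List.dropLast_concat_getLast hne]
        rw [← hldef, ← Multiset.coe_singleton, ← Multiset.coe_add]
      have heq : (heap.erase m ++ [-v] : Multiset Int)
          = (heap : Multiset Int).erase m + {-v} := by
        rw [← Multiset.coe_singleton, ← Multiset.coe_add, Multiset.coe_erase]
      rw [heq, hperm, hsplit, hmeq, coe_insert_at]
      simp only [Multiset.map_add, Multiset.map_cons, Multiset.map_singleton]
      have herase : (Multiset.map (fun x => -x) (s.dropLast : Multiset Int) + {-l}).erase (-l)
          = Multiset.map (fun x => -x) (s.dropLast : Multiset Int) := by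
        rw [add_comm]
        simp [Multiset.singleton_add]
      rw [herase]
      rw [add_comm]
      simp [Multiset.singleton_add]

-- ===== VERDICT (by name: the statement is the Claim_ definition above) =====
theorem maxKelements_spec : Claim_equal_maxKelements := by
  intro nums k _ hpre
  unfold Spec_maxKelements maxKelements maxKelements_alt
  rcases hpre with hne | hk
  · apply loop_eq
    · simpa [PySem.List.sorted_eq_nil_iff] using hne
    · simpa using PySem.List.sorted_pairwise nums (fun x => x)
    · have : (PySem.List.sorted nums (fun x => x) false).Perm nums :=
        PySem.List.sorted_perm nums (fun x => x) false
      rw [Multiset.coe_eq_coe.mpr this]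
      rfl
  · have : k.toNat = 0 := Int.toNat_of_nonpos hk
    rw [this]
    rfl
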